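/- GENERATED by farm/worked/mk_tree_copies.py from farm/worked/codebook_decode_scalar_raw.4/Proof.lean (a worked proof of the farm's unit `codebook_decode_scalar_raw.4`,
   accepted by the verdict) — do not edit. -/
import Vorbis.Spec.Units.codebook_decode_scalar_raw_4

open X86 X86.User Asan Vorbis Vorbis.Spec

set_option maxRecDepth 4000
set_option maxHeartbeats 4000000

/-- Segment 4 of `codebook_decode_scalar_raw` (`done` … `ret`: `mov eax, r12d`, `add rsp`, six pops, `ret`): from the assertion
`AtDone` (= `Mid` + the reader's post + the result in r12d) to the function's `Returned`. The recipe of `Mid`'s doc comment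
(Vorbis/Spec/Codebook.lean): open the assertion and `Mid`, `v_entry` on `Mid.atEntry`, walk, `v_returned`, then post / saved /
same from the carried fields. -/
theorem Vorbis.Spec.Worked.codebook_decode_scalar_raw_4_ok : Vorbis.Spec.codebook_decode_scalar_raw_4.Statement := by
  intro Lay hLay μ hμ u₀ hcode others frames Blk len ret e u hat
  obtain ⟨hrip, hmid, hreader, hhi, hresult⟩ := hat
  obtain ⟨he, hrsp, hra, h15, h14, h13, h12, hbp, hbx, hsame, hcodeok, hinv, hun⟩ := hmid
  v_entry he
  have hdf := hinv.1
  have hmx := hinv.2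
  have hsse := Vorbis.sseOK_of_abiInv hinv
  have hspan : Mem.EqOn Vorbis.L.textLo Vorbis.L.textHi u₀.mem u.mem := hcodeok
  u_walk hcode [hμ.vendor] span [Vorbis.L.textLo, Vorbis.L.textHi] side (v_side)
  refine ReachVia.done ?_
  v_returned
  · -- the post
    refine ⟨?_, ?_, ?_, ?_⟩
    · rw [w_mem]
      exact hun
    · rw [w_mem]
      exact hreader
    · rw [w_rax, Vorbis.toNat_ofBV32, Vorbis.toNat_part32]
      exact Nat.mod_lt _ (by decide)
    · have e1 : (s_10d786.reg .rax).toNat % 2 ^ 32 = (u.reg .r12).toNat % 2 ^ 32 := by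
        rw [w_rax, Vorbis.toNat_ofBV32, Vorbis.toNat_part32, Nat.mod_mod]
      unfold argInt at hresult ⊢
      rw [e1]
      exact hresult
  · -- the saved registers
    intro r hr
    cases r <;> first
      | (exact absurd hr (by decide))
      | (with_reducible assumption)
  · rw [w_mem]
    exact hsame
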